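-- pv_equiv track=rewrite | github.com/ieesejin/algorithm_study | programmers/신규 아이디 추천.py | solution
-- ===== SOURCE A (Python) =====
-- def solution(new_id):
--     answer = ''
--
--     # 1단계
--     new_id = new_id.lower()
--
--     # 2단계
--     for i in new_id:
--         # if c.isalpha() or c.isdigit() or c in ['-', '_', '.']:
--         if 'a' <= i <= 'z' or '0' <= i <= '9' or i == '-' or i == '_' or i == '.':
--             answer += i
--
--     # 3단계
--     # while '..' in answer:
--     #     answer = answer.replace('..', '.')
--     for i in range(len(answer), 1, -1):
--         answer = answer.replace('.' * i, '.')
--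
--     # 4단계
--     if answer == '.':
--         answer = ''
--     elif answer[0] == '.':
--         answer = answer[1:]
--     elif answer[-1] == '.':
--         answer = answer[:-1]
--
--     # 5단계
--     if answer == '':
--         answer = 'a'
--
--     # 6단계
--     if len(answer) >= 16:
--         answer = answer[:15]
--         if answer[-1] == '.':
--             answer = answer[:-1]
--
--     # 7단계
--     if len(answer) <= 2:
--         while len(answer) < 3:
--             answer += answer[-1]
--
--     return answer
-- ===== SOURCE B (Python) =====
-- def solution(new_id):
--     out = []
--     for ch in new_id.lower():
--         if 'a' <= ch <= 'z' or '0' <= ch <= '9' or ch in '-_.':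
--             if ch == '.' and out and out[-1] == '.':
--                 continue  # collapse dot runs inline
--             out.append(ch)
--     if out and out[0] == '.':
--         del out[0]
--     elif out and out[-1] == '.':
--         del out[-1]
--     if not out:
--         out = ['a']
--     if len(out) > 15:
--         out = out[:15]
--         if out[-1] == '.':
--             del out[-1]
--     out += out[-1:] * (3 - len(out))
--     return ''.join(out)
-- ===== Notes on version B (the rewrite author's own statement) =====
-- stated objective: faster
-- what changed: Steps 2-3 (the filter loop followed by a loop running replace over dot-patterns of every length up to len) are merged into one left-to-right pass that keeps a valid character and skips a dot whose previous kept character is already a dot, collapsing dot runs inline; the step-7 while loop becomes arithmetic padding by repeating the last character.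
-- outside the precondition, e.g. on solution('!!'): A raises IndexError, B returns 'aaa'
import Mathlib
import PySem

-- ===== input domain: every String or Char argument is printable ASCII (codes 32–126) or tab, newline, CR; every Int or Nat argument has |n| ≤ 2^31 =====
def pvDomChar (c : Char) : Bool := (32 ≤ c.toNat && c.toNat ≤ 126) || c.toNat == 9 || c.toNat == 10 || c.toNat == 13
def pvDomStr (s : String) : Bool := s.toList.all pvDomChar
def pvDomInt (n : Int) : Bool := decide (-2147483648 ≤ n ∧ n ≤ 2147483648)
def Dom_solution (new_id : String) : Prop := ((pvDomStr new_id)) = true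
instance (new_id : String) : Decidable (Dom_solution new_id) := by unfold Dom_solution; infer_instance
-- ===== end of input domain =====

-- B merges A's filter pass and A's quadratic loop of replace('.'*i,'.') into ONE left-to-right pass
-- that collapses dot runs inline, and replaces the step-7 while loop by arithmetic padding;
-- equality of the return value is claimed on Pre_ (A raises IndexError when no character survives the filter).

-- ===== PORT A =====
-- the character test of A's step 2 (A tests the already-lowercased character)
def validC (c : Char) : Bool :=
  (decide ('a' ≤ c) && decide (c ≤ 'z')) || (decide ('0' ≤ c) && decide (c ≤ '9')) ||
    (c == '-') || (c == '_') || (c == '.')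

-- step 7 of A: `while len(answer) < 3: answer += answer[-1]`
def pad7 (ans : List Char) : List Char :=
  if ans.length < 3 then pad7 (ans ++ [PySem.List.pyGetD ans (-1) ' ']) else ans
termination_by 3 - ans.length
decreasing_by all_goals (simp; try omega)

def solution (new_id : String) : String :=
  -- step 1

  let cs := PySem.Chars.lower new_id.toList
  let ans1 := cs.foldl (fun acc c => if validC c then acc ++ [c] else acc) ([] : List Char)
  let ans2 := (PySem.List.pyRange (PySem.List.len ans1) 1 (-1)).foldl
      (fun a i => PySem.Chars.replace a (List.replicate i.toNat '.') ['.']) ans1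
  let ans3 := if ans2 = ['.'] then []
    else if PySem.List.pyGetD ans2 0 ' ' = '.' then PySem.List.slice ans2 (some 1) none
    else if PySem.List.pyGetD ans2 (-1) ' ' = '.' then PySem.List.slice ans2 none (some (-1))
    else ans2
  let ans4 := if ans3 = [] then ['a'] else ans3
  let ans5 := if 16 ≤ ans4.length then
      (let t := PySem.List.slice ans4 none (some 15);
       if PySem.List.pyGetD t (-1) ' ' = '.' then PySem.List.slice t none (some (-1)) else t)
    else ans4
  let ans6 := if ans5.length ≤ 2 then pad7 ans5 else ans5
  String.mk ans6

def solution_alt (new_id : String) : String :=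
  let out := (PySem.Chars.lower new_id.toList).foldl
    (fun acc c => if validC c then
        (if c == '.' && (PySem.List.pyGet? acc (-1) == some '.') then acc else acc ++ [c])
      else acc) ([] : List Char)
  let o1 := if PySem.List.pyGet? out 0 = some '.' then out.drop 1
    else if PySem.List.pyGet? out (-1) = some '.' then out.dropLast
    else out
  let o2 := if o1 = [] then ['a'] else o1
  let o3 := if 15 < o2.length then
      (let t := PySem.List.slice o2 none (some 15);
       if PySem.List.pyGet? t (-1) = some '.' then t.dropLast else t)
    else o2
  let o4 := o3 ++ (List.replicate (3 - PySem.List.len o3).toNat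
      (PySem.List.slice o3 (some (-1)) none)).flatten
  String.mk o4


-- ===== PRECONDITION & SPEC =====
-- Pre_ excludes exactly the inputs with no letter, digit, hyphen, underscore or dot: there A's step 4
-- evaluates answer[0] on the empty string and raises IndexError.
def Pre_solution (new_id : String) : Prop :=
  (new_id.toList.any (fun c => validC (PySem.Chars.lowerChar c))) = true
instance (new_id : String) : Decidable (Pre_solution new_id) := by unfold Pre_solution; infer_instance

def pvWitness_solution : String := "..AB!cd."

def Spec_solution (new_id : String) (out : String) : Prop := out = solution_alt new_id
instance (new_id : String) (out : String) : Decidable (Spec_solution new_id out) := by unfold Spec_solution; infer_instance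

-- ===== CLAIM (what is proved, stated in full; the proofs are below) =====
def Claim_equal_solution : Prop := ∀ (new_id : String), Dom_solution new_id → Pre_solution new_id → Spec_solution new_id (solution new_id)

-- ===== LEMMAS AND PROOFS =====

def repl (n : Nat) : List Char → List Char
  | [] => []
  | c :: t => if (List.replicate (n+1) '.').isPrefixOf (c :: t)
      then '.' :: repl n ((c :: t).drop (n+1))
      else c :: repl n t
termination_by l => l.length
decreasing_by all_goals (simp; try omega)

theorem repl_nil (n : Nat) : repl n [] = [] := by rw [repl]

theorem replace_go_eq (n : Nat) :
    ∀ fuel l acc, l.length ≤ fuel →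
      PySem.Chars.replace.go (List.replicate (n+1) '.') ['.'] fuel l acc
        = acc.reverse ++ repl n l := by
  intro fuel
  induction fuel with
  | zero =>
    intro l acc h
    have : l = [] := by simpa using h
    subst this
    simp [PySem.Chars.replace.go, repl]
  | succ f ih =>
    intro l acc h
    cases l with
    | nil => simp [PySem.Chars.replace.go, repl]
    | cons c t =>
      rw [PySem.Chars.replace.go]
      rw [repl]
      by_cases hp : (List.replicate (n+1) '.').isPrefixOf (c :: t)
      · simp only [hp, if_true]
        rw [ih _ _ (by simp at h ⊢; omega)]
        simp
      · simp only [hp, if_false, Bool.false_eq_true]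
        rw [ih _ _ (by simp at h ⊢; omega)]
        simp

theorem replace_eq_repl (n : Nat) (l : List Char) :
    PySem.Chars.replace l (List.replicate (n+1) '.') ['.'] = repl n l := by
  rw [PySem.Chars.replace, if_neg (by simp)]
  simpa using replace_go_eq n l.length l [] le_rfl

theorem rep_not_prefix (n j : Nat) (hj : j ≤ n) (c : Char) (hc : c ≠ '.') (t : List Char) :
    ¬ (List.replicate (n+1) '.').isPrefixOf (List.replicate j '.' ++ c :: t) := by
  intro h
  rw [List.isPrefixOf_iff_prefix] at h
  have h1 := h.getElem (i := j) (by simp; omega)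
  rw [List.getElem_replicate] at h1
  rw [List.getElem_append_right (by simp)] at h1
  simp at h1
  exact hc h1.symm

theorem repl_dots_prefix (n : Nat) (r : List Char) :
    repl n (List.replicate (n+1) '.' ++ r) = '.' :: repl n r := by
  rw [show List.replicate (n+1) '.' ++ r = '.' :: (List.replicate n '.' ++ r) by
    simp [List.replicate_succ]]
  rw [repl]
  rw [if_pos]
  · congr 1
    congr 1
    rw [show ('.' :: (List.replicate n '.' ++ r)) = List.replicate (n+1) '.' ++ r by
      simp [List.replicate_succ]]
    rw [List.drop_append_of_le_length (by simp)]
    simp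
  · rw [List.isPrefixOf_iff_prefix]
    exact ⟨r, by simp [List.replicate_succ]⟩

theorem repl_cons_ne (n : Nat) (c : Char) (hc : c ≠ '.') (t : List Char) :
    repl n (c :: t) = c :: repl n t := by
  rw [repl, if_neg]
  exact rep_not_prefix n 0 (by omega) c hc t

theorem repl_dots_lt (n j : Nat) (hj : j < n+1) (c : Char) (hc : c ≠ '.') (t : List Char) :
    repl n (List.replicate j '.' ++ c :: t) = List.replicate j '.' ++ c :: repl n t := by
  induction j with
  | zero => simpa using repl_cons_ne n c hc t
  | succ j ihj =>
    rw [List.replicate_succ, List.cons_append, repl, if_neg]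
    · rw [ihj (by omega)]; simp
    · rw [show '.' :: (List.replicate j '.' ++ c :: t) = List.replicate (j+1) '.' ++ c :: t by
        simp [List.replicate_succ]]
      exact rep_not_prefix n (j+1) (by omega) c hc t

theorem repl_dots_all (n j : Nat) (hj : j < n+1) :
    repl n (List.replicate j '.') = List.replicate j '.' := by
  induction j with
  | zero => simp [repl]
  | succ j ihj =>
    rw [List.replicate_succ, repl, if_neg]
    · rw [ihj (by omega)]
    · intro h
      rw [List.isPrefixOf_iff_prefix] at h
      have := h.length_le
      simp at this
      omega

def col (p : Bool) : List Char → List Char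
  | [] => []
  | c :: t => if p && (c == '.') then col p t else c :: col (c == '.') t

theorem col_true_dots (j : Nat) (r : List Char) :
    col true (List.replicate j '.' ++ r) = col true r := by
  induction j with
  | zero => simp
  | succ j ihj => rw [List.replicate_succ, List.cons_append, col]; simpa using ihj

theorem col_false_cons (c : Char) (hc : c ≠ '.') (X : List Char) :
    col false (c :: X) = c :: col false X := by
  rw [col, show (c == '.') = false from by simp [hc]]
  simp

theorem col_false_dots_cons (j : Nat) (c : Char) (hc : c ≠ '.') (X : List Char) :
    col false (List.replicate (j+1) '.' ++ c :: X) = '.' :: c :: col false X := by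
  rw [List.replicate_succ, List.cons_append, col]
  simp only [Bool.false_and, if_false, Bool.false_eq_true]
  rw [show ('.' == '.') = true by decide, col_true_dots]
  rw [col, show (c == '.') = false from by simp [hc]]
  simp

theorem col_false_dots (j : Nat) : col false (List.replicate (j+1) '.') = ['.'] := by
  rw [List.replicate_succ, col]
  simp only [Bool.false_and, if_false, Bool.false_eq_true]
  rw [show ('.' == '.') = true by decide]
  rw [show List.replicate j '.' = List.replicate j '.' ++ ([] : List Char) by simp, col_true_dots]
  simp [col]

def noRun (m : Nat) (l : List Char) : Prop := ¬ (List.replicate m '.' <:+: l)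

theorem noRun_of_length (m : Nat) (l : List Char) (h : l.length < m) : noRun m l := by
  intro hinf
  have := hinf.length_le
  simp at this
  omega

theorem noRun_suffix {m : Nat} {l t : List Char} (h : noRun m l) (ht : t <:+ l) : noRun m t :=
  fun hinf => h (hinf.trans ht.isInfix)

theorem noRun_mono {m m' : Nat} {l : List Char} (h : noRun m l) (hm : m ≤ m') : noRun m' l := by
  intro hinf
  have hpre : List.replicate m '.' <+: List.replicate m' '.' :=
    ⟨List.replicate (m' - m) '.', by rw [← List.replicate_add]; congr 1; omega⟩
  exact h (hpre.isInfix.trans hinf)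

theorem col_id_aux : ∀ (l : List Char) (p : Bool), (p = true → l.head? ≠ some '.') →
    noRun 2 l → col p l = l := by
  intro l
  induction l with
  | nil => intro p _ _; rfl
  | cons c t ih =>
    intro p hp h2
    rw [col]
    have hskip : (p && (c == '.')) = false := by
      cases hpb : p
      · simp
      · simp only [Bool.true_and]
        by_contra hcb
        simp at hcb
        exact hp hpb (by simp [hcb])
    rw [hskip]
    simp only [Bool.false_eq_true, if_false]
    congr 1
    apply ih
    · intro hcd
      simp at hcd
      subst hcd
      intro hh
      cases t with
      | nil => simp at hh
      | cons d t2 =>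
        simp at hh
        subst hh
        exact h2 ⟨[], t2, rfl⟩
    · exact noRun_suffix h2 (List.suffix_cons c t)

theorem suffix_append_cons {t A B : List Char} {c : Char} (h : t <:+ A ++ c :: B) :
    (∃ A', A' <:+ A ∧ t = A' ++ c :: B) ∨ t <:+ B := by
  induction A with
  | nil =>
    simp at h
    rcases List.suffix_cons_iff.1 h with h1 | h1
    · exact Or.inl ⟨[], List.nil_suffix, by simpa using h1⟩
    · exact Or.inr h1
  | cons a A2 ih =>
    rcases List.suffix_cons_iff.1 h with h1 | h1
    · exact Or.inl ⟨a :: A2, List.suffix_refl _, by simpa using h1⟩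
    · rcases ih h1 with ⟨A', hA', ht⟩ | h2
      · exact Or.inl ⟨A', hA'.trans (List.suffix_cons a A2), ht⟩
      · exact Or.inr h2

theorem inf_split {m : Nat} {c : Char} (hc : c ≠ '.') {A B : List Char}
    (h : List.replicate m '.' <:+: A ++ c :: B) :
    m ≤ A.length ∨ List.replicate m '.' <:+: B := by
  rcases h with ⟨u, v, huv⟩
  -- replicate m '.' <+: (suffix of A ++ c :: B)
  have hsuf : List.replicate m '.' ++ v <:+ A ++ c :: B := ⟨u, by simpa using huv⟩
  rcases suffix_append_cons hsuf with ⟨A', hA'A, ht⟩ | h2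
  · -- replicate m '.' ++ v = A' ++ c :: B ; A' all dots
    by_cases hm : m ≤ A'.length
    · exact Or.inl (le_trans hm hA'A.length_le)
    · exfalso
      have hpre : List.replicate m '.' <+: A' ++ c :: B := ⟨v, by simpa using ht⟩
      have h1 := hpre.getElem (i := A'.length) (by simp; omega)
      rw [List.getElem_replicate, List.getElem_append_right (by simp)] at h1
      simp at h1
      exact hc h1.symm
  · exact Or.inr ((List.prefix_append _ _).isInfix.trans h2.isInfix)

theorem decomp (l : List Char) : ∃ j r, l = List.replicate j '.' ++ r ∧
    (r = [] ∨ ∃ c t, r = c :: t ∧ c ≠ '.') := by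
  refine ⟨(l.takeWhile (· == '.')).length, l.dropWhile (· == '.'), ?_, ?_⟩
  · conv_lhs => rw [← List.takeWhile_append_dropWhile (p := (· == '.')) (l := l)]
    congr 1
    rw [List.eq_replicate_iff]
    exact ⟨rfl, fun b hb => by simpa using List.mem_takeWhile_imp hb⟩
  · cases hr : l.dropWhile (· == '.') with
    | nil => exact Or.inl rfl
    | cons c t =>
      refine Or.inr ⟨c, t, rfl, ?_⟩
      have := List.head?_dropWhile_not (· == '.') l
      rw [hr] at this
      simpa using this

theorem run_le {m j : Nat} {r : List Char} (h : noRun m (List.replicate j '.' ++ r)) : j < m := by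
  by_contra hj
  apply h
  have hpre : List.replicate m '.' <+: List.replicate j '.' :=
    ⟨List.replicate (j - m) '.', by rw [← List.replicate_add]; congr 1; omega⟩
  exact (hpre.trans (List.prefix_append _ _)).isInfix

theorem repl_step_aux (k : Nat) : ∀ (N : Nat) (l : List Char), l.length ≤ N → noRun (k+3) l →
    col false (repl (k+1) l) = col false l ∧ noRun (k+2) (repl (k+1) l) := by
  intro N
  induction N with
  | zero =>
    intro l hN _
    have : l = [] := by simpa using hN
    subst this
    rw [repl_nil]
    exact ⟨rfl, noRun_of_length _ _ (by simp)⟩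
  | succ N ih =>
    intro l hN h
    obtain ⟨j, r, hl, hr⟩ := decomp l
    subst hl
    have hj : j < k + 3 := run_le h
    rcases hr with rfl | ⟨c, t, rfl, hc⟩
    · -- l = '.'^j
      by_cases hje : j = k + 2
      · subst hje
        rw [show List.replicate (k+2) '.' ++ ([] : List Char)
              = List.replicate ((k+1)+1) '.' ++ ([] : List Char) by rfl,
            repl_dots_prefix]
        constructor
        · rw [repl_nil]
          rw [show ('.' :: [] : List Char) = List.replicate (0+1) '.' from rfl, col_false_dots]
          rw [show ((k+2) : Nat) = (k+1)+1 from rfl]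
          simp [col_false_dots]
        · rw [repl_nil]
          exact noRun_of_length _ _ (by simp; try omega)
      · have hjlt : j < k + 2 := by omega
        rw [List.append_nil, repl_dots_all (k+1) j (by omega)]
        exact ⟨rfl, noRun_of_length _ _ (by simp; omega)⟩
    · -- l = '.'^j ++ c :: t
      have htsuf : t <:+ List.replicate j '.' ++ c :: t :=
        ⟨List.replicate j '.' ++ [c], by simp⟩
      have htn : noRun (k+3) t := noRun_suffix h htsuf
      have htlen : t.length ≤ N := by simp at hN; omega
      obtain ⟨hcol, hnr⟩ := ih t htlen htn
      by_cases hje : j = k + 2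
      · subst hje
        rw [show List.replicate (k+2) '.' ++ c :: t = List.replicate ((k+1)+1) '.' ++ c :: t from rfl,
            repl_dots_prefix, repl_cons_ne (k+1) c hc t]
        constructor
        · rw [show ('.' :: c :: repl (k+1) t) = List.replicate (0+1) '.' ++ c :: repl (k+1) t from rfl,
              col_false_dots_cons 0 c hc, hcol,
              show ((k+2) : Nat) = (k+1)+1 from rfl, col_false_dots_cons (k+1) c hc]
        · intro hinf
          rw [show ('.' :: c :: repl (k+1) t) = ['.'] ++ c :: repl (k+1) t from rfl] at hinf
          rcases inf_split hc hinf with h1 | h1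
          · simp at h1; try omega
          · exact hnr h1
      · have hjlt : j < (k+1) + 1 := by omega
        rw [repl_dots_lt (k+1) j hjlt c hc t]
        constructor
        · cases j with
          | zero =>
            simp only [List.replicate_zero, List.nil_append]
            rw [col_false_cons c hc, hcol, col_false_cons c hc]
          | succ j' =>
            rw [col_false_dots_cons j' c hc, hcol, col_false_dots_cons j' c hc]
        · intro hinf
          rcases inf_split hc hinf with h1 | h1
          · simp at h1; try omega
          · exact hnr h1

theorem repl_step (k : Nat) (l : List Char) (h : noRun (k+3) l) :
    col false (repl (k+1) l) = col false l ∧ noRun (k+2) (repl (k+1) l) :=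
  repl_step_aux k l.length l le_rfl h

theorem pyRange_down (k : Nat) :
    PySem.List.pyRange ((k:Int)+2) 1 (-1) = ((k:Int)+2) :: PySem.List.pyRange ((k:Int)+1) 1 (-1) := by
  simp only [PySem.List.pyRange]
  norm_num
  rw [if_pos (by omega), show ((k:Int)+2).toNat - 1 = k + 1 by omega,
      show (if 0 < k then k else 0) = k by split <;> omega]
  rw [List.range_succ_eq_map]
  simp only [List.map_cons, List.map_map, Nat.cast_zero]
  rw [List.cons_eq_cons]
  refine ⟨by ring, ?_⟩
  apply List.map_congr_left
  intro m _
  simp [Function.comp]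
  ring

theorem foldl_replace_eq_col : ∀ (N : Nat) (l : List Char), noRun (N+1) l →
    (PySem.List.pyRange (N:Int) 1 (-1)).foldl
      (fun a i => PySem.Chars.replace a (List.replicate i.toNat '.') ['.']) l = col false l := by
  intro N
  induction N using Nat.strong_induction_on with
  | _ N ih =>
    match N with
    | 0 =>
      intro l h
      rw [show PySem.List.pyRange ((0:Nat):Int) 1 (-1) = [] by decide]
      rw [List.foldl_nil]
      exact (col_id_aux l false (by simp) (noRun_mono h (by omega))).symm
    | 1 =>
      intro l h
      rw [show PySem.List.pyRange ((1:Nat):Int) 1 (-1) = [] by decide]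
      rw [List.foldl_nil]
      exact (col_id_aux l false (by simp) h).symm
    | (k+2) =>
      intro l h
      rw [show ((k+2 : Nat) : Int) = (k:Int)+2 by push_cast; ring, pyRange_down]
      rw [List.foldl_cons]
      rw [show ((k:Int)+2).toNat = (k+1)+1 by omega]
      rw [replace_eq_repl (k+1) l]
      have hs := repl_step k l (by exact_mod_cast h)
      rw [show ((k:Int)+1) = ((k+1 : Nat) : Int) by push_cast; ring]
      rw [ih (k+1) (by omega) _ hs.2, hs.1]

theorem foldl_B_eq_col (l : List Char) :
    ∀ acc, l.foldl (fun acc c => if validC c then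
        (if c == '.' && (PySem.List.pyGet? acc (-1) == some '.') then acc else acc ++ [c])
      else acc) acc = acc ++ col (decide (acc.getLast? = some '.')) (l.filter validC) := by
  induction l with
  | nil => intro acc; simp [col]
  | cons c t ih =>
    intro acc
    rw [List.foldl_cons]
    by_cases hv : validC c
    · rw [if_pos hv]
      rw [List.filter_cons_of_pos hv]
      by_cases hskip : (c == '.' && (PySem.List.pyGet? acc (-1) == some '.')) = true
      · rw [if_pos hskip, ih]
        simp only [Bool.and_eq_true, beq_iff_eq] at hskip
        obtain ⟨hcd, hlast⟩ := hskip
        rw [PySem.List.pyGet?_neg_one] at hlast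
        rw [col, if_pos (by simp [hcd, hlast])]
      · rw [if_neg hskip, ih]
        simp only [Bool.and_eq_true, beq_iff_eq, not_and] at hskip
        rw [col, if_neg ?hcond]
        case hcond =>
          intro hboth
          simp only [Bool.and_eq_true, beq_iff_eq, decide_eq_true_eq] at hboth
          exact hskip hboth.2 (by rw [PySem.List.pyGet?_neg_one]; exact hboth.1)
        rw [List.append_assoc]
        congr 1
        rw [show (acc ++ [c]).getLast? = some c by simp]
        simp only [List.singleton_append]
        rw [show (decide (some c = some '.')) = (c == '.') from by cases hb : c == '.' <;> simp_all]
    · rw [if_neg hv, List.filter_cons_of_neg hv, ih]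

theorem col_ne_nil (c : Char) (t : List Char) : col false (c :: t) ≠ [] := by
  rw [col]
  simp

theorem pad7_one (a : Char) : pad7 [a] = [a, a, a] := by
  rw [pad7, if_pos (by simp)]
  rw [show PySem.List.pyGetD [a] (-1) ' ' = a from by
    simp [PySem.List.pyGetD, PySem.List.pyGet?_neg_one]]
  rw [pad7, if_pos (by simp)]
  rw [show PySem.List.pyGetD ([a] ++ [a]) (-1) ' ' = a from by
    simp [PySem.List.pyGetD, PySem.List.pyGet?_neg_one]]
  rw [pad7, if_neg (by simp)]
  simp

theorem pad7_two (a b : Char) : pad7 [a, b] = [a, b, b] := by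
  rw [pad7, if_pos (by simp)]
  rw [show PySem.List.pyGetD [a, b] (-1) ' ' = b from by
    simp [PySem.List.pyGetD, PySem.List.pyGet?_neg_one]]
  rw [pad7, if_neg (by simp)]
  simp

theorem step4_eq (m : List Char) (hm : m ≠ []) :
    (if m = ['.'] then ([] : List Char)
      else if PySem.List.pyGetD m 0 ' ' = '.' then PySem.List.slice m (some 1) none
      else if PySem.List.pyGetD m (-1) ' ' = '.' then PySem.List.slice m none (some (-1))
      else m)
    = (if PySem.List.pyGet? m 0 = some '.' then m.drop 1
      else if PySem.List.pyGet? m (-1) = some '.' then m.dropLast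
      else m) := by
  cases m with
  | nil => exact absurd rfl hm
  | cons c t =>
    by_cases hc : c = '.'
    · subst hc
      by_cases ht : t = []
      · subst ht; decide
      · have hL : (if '.' :: t = ['.'] then ([] : List Char)
            else if PySem.List.pyGetD ('.' :: t) 0 ' ' = '.' then PySem.List.slice ('.' :: t) (some 1) none
            else if PySem.List.pyGetD ('.' :: t) (-1) ' ' = '.' then PySem.List.slice ('.' :: t) none (some (-1))
            else '.' :: t) = t := by
          rw [if_neg (by simp [ht]),
              if_pos (by simp [PySem.List.pyGetD]),
              PySem.List.slice_from _ (by norm_num)]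
          simp
        have hR : (if PySem.List.pyGet? ('.' :: t) 0 = some '.' then ('.' :: t).drop 1
            else if PySem.List.pyGet? ('.' :: t) (-1) = some '.' then ('.' :: t).dropLast
            else '.' :: t) = t := by
          rw [if_pos (by simp)]
          simp
        rw [hL, hR]
    · have h1 : ¬ (c :: t = ['.']) := by simp; intro h; exact absurd h hc
      have h2 : ¬ (PySem.List.pyGetD (c :: t) 0 ' ' = '.') := by
        simp [PySem.List.pyGetD, hc]
      have h3 : ¬ (PySem.List.pyGet? (c :: t) 0 = some '.') := by
        simp [hc]
      rw [if_neg h1, if_neg h2, if_neg h3]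
      rw [PySem.List.pyGetD_neg_one _ _ hm, PySem.List.pyGet?_neg_one,
          List.getLast?_eq_some_getLast hm]
      by_cases hl : (c :: t).getLast hm = '.'
      · rw [if_pos hl, if_pos (by simp [hl]), PySem.List.slice_to_neg_one]
      · rw [if_neg hl, if_neg (by simp [hl])]

theorem step6_eq (x : List Char) :
    (if 16 ≤ x.length then
      (if PySem.List.pyGetD (PySem.List.slice x none (some 15)) (-1) ' ' = '.'
        then PySem.List.slice (PySem.List.slice x none (some 15)) none (some (-1))
        else PySem.List.slice x none (some 15))
     else x)
    = (if 15 < x.length then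
      (if PySem.List.pyGet? (PySem.List.slice x none (some 15)) (-1) = some '.'
        then (PySem.List.slice x none (some 15)).dropLast
        else PySem.List.slice x none (some 15))
     else x) := by
  by_cases h : 16 ≤ x.length
  · rw [if_pos h, if_pos (show 15 < x.length by omega)]
    have ht : PySem.List.slice x none (some 15) ≠ [] := by
      rw [PySem.List.slice_to _ (by norm_num)]
      intro he
      rcases List.take_eq_nil_iff.1 he with he | he
      · norm_num at he
      · subst he; simp at h
    rw [PySem.List.pyGetD_neg_one _ _ ht, PySem.List.pyGet?_neg_one,
        List.getLast?_eq_some_getLast ht]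
    by_cases hl : (PySem.List.slice x none (some 15)).getLast ht = '.'
    · rw [if_pos hl, if_pos (by simp [hl]), PySem.List.slice_to_neg_one]
    · rw [if_neg hl, if_neg (by simp [hl])]
  · rw [if_neg h, if_neg (show ¬ 15 < x.length by omega)]

theorem step7_eq (x : List Char) (hx : x ≠ []) :
    (if x.length ≤ 2 then pad7 x else x)
    = x ++ (List.replicate (3 - PySem.List.len x).toNat
        (PySem.List.slice x (some (-1)) none)).flatten := by
  match x with
  | [a] =>
    rw [if_pos (by simp)]
    rw [pad7_one]
    rw [show PySem.List.slice [a] (some (-1)) none = [a] from by simp [PySem.List.slice]]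
    simp [PySem.List.len]
  | [a, b] =>
    rw [if_pos (by simp)]
    rw [pad7_two]
    rw [show PySem.List.slice [a, b] (some (-1)) none = [b] from by simp [PySem.List.slice]]
    simp [PySem.List.len]
  | a :: b :: c :: t =>
    rw [if_neg (by simp)]
    rw [show (3 - PySem.List.len (a :: b :: c :: t)).toNat = 0 from by
      simp [PySem.List.len]; omega]
    simp

theorem core_A (cs : List Char) :
    (PySem.List.pyRange (PySem.List.len
        (cs.foldl (fun acc c => if validC c then acc ++ [c] else acc) ([] : List Char))) 1 (-1)).foldl
      (fun a i => PySem.Chars.replace a (List.replicate i.toNat '.') ['.'])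
      (cs.foldl (fun acc c => if validC c then acc ++ [c] else acc) ([] : List Char))
    = col false (cs.filter validC) := by
  have hf : cs.foldl (fun acc c => if validC c then acc ++ [c] else acc) ([] : List Char)
      = cs.filter validC := by
    have := PySem.List.foldl_append_if validC (id : Char → Char) cs []
    simpa using this
  rw [hf]
  rw [show PySem.List.len (cs.filter validC) = ((cs.filter validC).length : Int) from by
    simp [PySem.List.len]]
  exact foldl_replace_eq_col (cs.filter validC).length _
    (noRun_of_length _ _ (by simp))

theorem core_B (cs : List Char) :
    cs.foldl (fun acc c => if validC c then
        (if c == '.' && (PySem.List.pyGet? acc (-1) == some '.') then acc else acc ++ [c])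
      else acc) ([] : List Char)
    = col false (cs.filter validC) := by
  have := foldl_B_eq_col cs []
  simpa using this

theorem main_eq (new_id : String)
    (hpre : (new_id.toList.any (fun c => validC (PySem.Chars.lowerChar c))) = true) :
    solution new_id = solution_alt new_id := by
  rw [solution, solution_alt]
  simp only [core_A, core_B]
  set m := col false ((PySem.Chars.lower new_id.toList).filter validC) with hmdef
  have hm : m ≠ [] := by
    have hfne : (PySem.Chars.lower new_id.toList).filter validC ≠ [] := by
      simp only [ne_eq, List.filter_eq_nil_iff, not_forall]
      simp only [List.any_eq_true] at hpre
      obtain ⟨c, hc, hv⟩ := hpre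
      exact ⟨PySem.Chars.lowerChar c, by simp [PySem.Chars.lower]; exact ⟨c, hc, rfl⟩, by simpa using hv⟩
    cases hfc : (PySem.Chars.lower new_id.toList).filter validC with
    | nil => exact absurd hfc hfne
    | cons c t => rw [hmdef, hfc]; exact col_ne_nil c t
  congr 1
  rw [step4_eq m hm]
  set r4 := if PySem.List.pyGet? m 0 = some '.' then m.drop 1
    else if PySem.List.pyGet? m (-1) = some '.' then m.dropLast
    else m with hr4
  set r5 := if r4 = [] then ['a'] else r4 with hr5
  have hr5ne : r5 ≠ [] := by
    rw [hr5]; split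
    · simp
    · assumption
  rw [step6_eq r5]
  set r6 := if 15 < r5.length then
      (if PySem.List.pyGet? (PySem.List.slice r5 none (some 15)) (-1) = some '.'
        then (PySem.List.slice r5 none (some 15)).dropLast
        else PySem.List.slice r5 none (some 15))
    else r5 with hr6
  have hr6ne : r6 ≠ [] := by
    rw [hr6]
    split
    · rw [PySem.List.slice_to _ (by norm_num)]
      split
      · intro he
        have := congrArg List.length he
        simp at this
        omega
      · intro he
        rcases List.take_eq_nil_iff.1 he with he | he
        · norm_num at he
        · exact hr5ne he
    · exact hr5ne
  exact step7_eq r6 hr6ne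


-- ===== VERDICT (by name: the statement is the Claim_ definition above) =====
theorem solution_spec : Claim_equal_solution := by
  intro new_id _ hpre
  unfold Spec_solution
  exact main_eq new_id hpre
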